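-- pv_equiv track=rewrite | github.com/twallett/NLP | Stuff/BPE.py | hm_whitespace_tokenizer
-- ===== SOURCE A (Python) =====
-- def hm_whitespace_tokenizer(text_):
--
--     letters = []
--     words_ = []
--     len_word = 0
--     len_list = 0
--     for letter in text_:
--         if letter == " ":
--             words_.append("".join(letters[len_list - len_word:len_list]))
--             len_word = 0
--         if letter != " ":
--             letters.append(letter)
--             len_word += 1
--             len_list += 1
--
--     return words_
-- ===== SOURCE B (Python) =====
-- def hm_whitespace_tokenizer(text_):
--     return text_.split(" ")[:-1]
-- ===== Notes on version B (the rewrite author's own statement) =====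
-- stated objective: idiomatic
-- what changed: Replaced the hand-rolled character-accumulation loop (letters buffer, two length counters, slicing and joining a growing list on each separator) with a single call to str.split on the literal separator followed by dropping the last element.
import Mathlib
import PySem

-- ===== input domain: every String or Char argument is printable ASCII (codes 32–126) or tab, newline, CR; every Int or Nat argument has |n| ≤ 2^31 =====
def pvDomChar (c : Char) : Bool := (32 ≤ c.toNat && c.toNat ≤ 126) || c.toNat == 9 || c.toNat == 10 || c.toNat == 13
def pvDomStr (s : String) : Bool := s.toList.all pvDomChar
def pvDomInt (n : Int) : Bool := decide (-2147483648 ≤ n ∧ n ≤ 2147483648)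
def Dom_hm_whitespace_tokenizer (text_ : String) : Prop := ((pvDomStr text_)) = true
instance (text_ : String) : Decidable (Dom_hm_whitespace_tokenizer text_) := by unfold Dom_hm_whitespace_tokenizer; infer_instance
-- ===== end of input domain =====

-- B replaces A's character-accumulation loop with the idiomatic text_.split(" ")[:-1]; same return value, not claimed faster.

-- ===== PORT A =====
-- loop state: (letters, words_, len_word, len_list)
def hmStep (s : List Char × List String × Int × Int) (letter : Char) :
    List Char × List String × Int × Int :=
  let letters := s.1
  let words_ := s.2.1
  let len_word := s.2.2.1
  let len_list := s.2.2.2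
  let p : List String × Int :=
    if letter = ' ' then
      (words_ ++ [String.ofList (PySem.List.slice letters (some (len_list - len_word)) (some len_list))], 0)
    else (words_, len_word)
  if letter ≠ ' ' then (letters ++ [letter], p.1, p.2 + 1, len_list + 1)
  else (letters, p.1, p.2, len_list)

def hm_whitespace_tokenizer (text_ : String) : List String :=
  (text_.toList.foldl hmStep ([], [], 0, 0)).2.1

-- ===== PORT B =====
-- text_.split(" ")[:-1]; split with the nonempty literal sep " " is PySem.Chars.splitOn, [:-1] is PySem.List.slice … (-1)
def hm_whitespace_tokenizer_alt (text_ : String) : List String :=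
  PySem.List.slice ((PySem.Chars.splitOn text_.toList " ".toList).map String.ofList) none (some (-1))

-- ===== PRECONDITION & SPEC =====
def Spec_hm_whitespace_tokenizer (text_ : String) (out : List String) : Prop := out = hm_whitespace_tokenizer_alt text_
instance (text_ : String) (out : List String) : Decidable (Spec_hm_whitespace_tokenizer text_ out) := by unfold Spec_hm_whitespace_tokenizer; infer_instance

-- ===== CLAIM (what is proved, stated in full; the proofs are below) =====
def Claim_equal_hm_whitespace_tokenizer : Prop := ∀ (text_ : String), Dom_hm_whitespace_tokenizer text_ → Spec_hm_whitespace_tokenizer text_ (hm_whitespace_tokenizer text_)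

-- ===== LEMMAS AND PROOFS =====

-- split on the single char ' ': first word and remaining words
def splitChar : List Char → List Char × List (List Char)
  | [] => ([], [])
  | c :: t =>
      if c = ' ' then ([], (splitChar t).1 :: (splitChar t).2)
      else (c :: (splitChar t).1, (splitChar t).2)

theorem splitChar_go (l : List Char) : ∀ (fuel : Nat) (cur : List Char) (acc : List (List Char)),
    l.length < fuel →
    PySem.Chars.splitOn.go [' '] fuel l cur acc
      = acc.reverse ++ (cur.reverse ++ (splitChar l).1) :: (splitChar l).2 := by
  induction l with
  | nil =>
      intro fuel cur acc h
      match fuel with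
      | fuel + 1 => simp [PySem.Chars.splitOn.go, splitChar]
  | cons c t ih =>
      intro fuel cur acc h
      match fuel with
      | fuel + 1 =>
        by_cases hc : c = ' '
        · subst hc
          have hpre : [' '].isPrefixOf (' ' :: t) = true := by simp [List.isPrefixOf]
          simp only [PySem.Chars.splitOn.go, hpre, if_pos]
          have hd : List.drop [' '].length (' ' :: t) = t := rfl
          rw [hd, ih fuel [] (cur.reverse :: acc) (by simpa using Nat.lt_of_succ_lt_succ h)]
          simp [splitChar]
        · have hne : ¬ ' ' = c := fun h => hc h.symm
          have hpre : [' '].isPrefixOf (c :: t) = false := by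
            simp [List.isPrefixOf, hne]
          simp only [PySem.Chars.splitOn.go, hpre]
          rw [ih fuel (c :: cur) acc (by simpa using Nat.lt_of_succ_lt_succ h)]
          simp [splitChar, hc]

theorem splitOn_eq_splitChar (l : List Char) :
    PySem.Chars.splitOn l [' '] = (splitChar l).1 :: (splitChar l).2 := by
  unfold PySem.Chars.splitOn
  rw [splitChar_go l (l.length + 1) [] [] (by omega)]
  simp

theorem splitChar_append (cur l : List Char) (h : ' ' ∉ cur) :
    splitChar (cur ++ l) = (cur ++ (splitChar l).1, (splitChar l).2) := by
  induction cur with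
  | nil => simp
  | cons c t ih =>
      have hc : c ≠ ' ' := by intro hc; exact h (by simp [hc])
      simp only [List.cons_append, splitChar, hc, ite_false]
      rw [ih (by intro hm; exact h (by simp [hm]))]

theorem hm_loop (l : List Char) : ∀ (letters : List Char) (words : List String) (w : Nat),
    w ≤ letters.length → ' ' ∉ letters →
    (List.foldl hmStep (letters, words, (w : Int), (letters.length : Int)) l).2.1
      = words ++ ((List.map String.ofList
          ((splitChar (letters.drop (letters.length - w) ++ l)).1
            :: (splitChar (letters.drop (letters.length - w) ++ l)).2)).dropLast) := by
  induction l with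
  | nil =>
      intro letters words w hw hsp
      have hnos : ' ' ∉ letters.drop (letters.length - w) := fun hm => hsp (List.mem_of_mem_drop hm)
      rw [show letters.drop (letters.length - w) ++ ([] : List Char)
            = letters.drop (letters.length - w) ++ [] from rfl]
      rw [splitChar_append _ [] hnos]
      simp [List.foldl, splitChar]
  | cons c t ih =>
      intro letters words w hw hsp
      have hnos : ' ' ∉ letters.drop (letters.length - w) := fun hm => hsp (List.mem_of_mem_drop hm)
      by_cases hc : c = ' '
      · subst hc
        -- the slice computes the pending word letters[len-w : len]
        have hcast : (letters.length : Int) - (w : Int) = ((letters.length - w : Nat) : Int) := by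
          omega
        have hslice : PySem.List.slice letters (some ((letters.length : Int) - (w : Int)))
            (some ((letters.length : Int))) = letters.drop (letters.length - w) := by
          rw [hcast, PySem.List.slice_natCast]
          exact List.take_of_length_le (by simp)
        simp only [List.foldl, hmStep, if_pos, ne_eq, not_true_eq_false, ite_false, hslice]
        rw [show ((0 : Int)) = ((0 : Nat) : Int) from rfl]
        rw [ih letters _ 0 (Nat.zero_le _) hsp]
        rw [splitChar_append _ (' ' :: t) hnos]
        simp only [splitChar, if_pos, List.map_cons, List.append_assoc]
        simp [List.dropLast]
      · have hcast1 : (letters.length : Int) + 1 = (((letters ++ [c]).length : Nat) : Int) := by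
          simp
        have hcast2 : ((w : Int) + 1) = (((w + 1 : Nat)) : Int) := by push_cast; ring
        simp only [List.foldl, hmStep, hc, if_neg, ne_eq, not_false_eq_true, if_pos]
        have hle : w + 1 ≤ (letters ++ [c]).length := by simp; omega
        have hmem : ' ' ∉ letters ++ [c] := by
          intro hm
          rcases List.mem_append.mp hm with h1 | h1
          · exact hsp h1
          · exact hc (List.mem_singleton.mp h1).symm
        rw [hcast1, hcast2, ih (letters ++ [c]) words (w + 1) hle hmem]
        have hlen : (letters ++ [c]).length - (w + 1) = letters.length - w := by
          simp only [List.length_append, List.length_singleton]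
          omega
        have hdrop : (letters ++ [c]).drop ((letters ++ [c]).length - (w + 1))
            = letters.drop (letters.length - w) ++ [c] := by
          rw [hlen]
          exact List.drop_append_of_le_length (by omega)
        rw [hdrop]
        simp

-- ===== VERDICT (by name: the statement is the Claim_ definition above) =====
theorem hm_whitespace_tokenizer_spec : Claim_equal_hm_whitespace_tokenizer := by
  intro text_ _
  unfold Spec_hm_whitespace_tokenizer hm_whitespace_tokenizer hm_whitespace_tokenizer_alt
  rw [show ((0 : Int), (0 : Int)) = (((0 : Nat) : Int), (([] : List Char).length : Int)) from rfl]
  rw [hm_loop text_.toList [] [] 0 (Nat.le_refl _) (by simp)]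
  rw [show (" ".toList) = [' '] from rfl, splitOn_eq_splitChar]
  rw [PySem.List.slice_to_neg_one]
  simp
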